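-- pv_equiv track=rewrite | github.com/alvarosc2000/python-full | code_test/cadena_log_max.py | cadenaLongMax
-- ===== SOURCE A (Python) =====
-- def cadenaLongMax(cadena):
--     if cadena == []:
--         return []
--
--     lista = []
--     maxima_log = 0
--
--     for elem in cadena:
--         if len(elem) > maxima_log:
--             maxima_log = len(elem)
--
--     for elem2 in cadena:
--         if len(elem2) == maxima_log:
--             lista.append(elem2)
--
--     return lista
-- ===== SOURCE B (Python) =====
-- def cadenaLongMax(cadena):
--     maxima = 0
--     lista = []
--     for elem in cadena:
--         if len(elem) > maxima:
--             maxima = len(elem)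
--             lista = [elem]
--         elif len(elem) == maxima:
--             lista.append(elem)
--     return lista
-- ===== Notes on version B (the rewrite author's own statement) =====
-- stated objective: simpler
-- what changed: Replaces A's two passes (find max length, then collect) with a single streaming pass keeping (current max, current winners) and resetting the list on a new maximum.
import Mathlib
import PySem

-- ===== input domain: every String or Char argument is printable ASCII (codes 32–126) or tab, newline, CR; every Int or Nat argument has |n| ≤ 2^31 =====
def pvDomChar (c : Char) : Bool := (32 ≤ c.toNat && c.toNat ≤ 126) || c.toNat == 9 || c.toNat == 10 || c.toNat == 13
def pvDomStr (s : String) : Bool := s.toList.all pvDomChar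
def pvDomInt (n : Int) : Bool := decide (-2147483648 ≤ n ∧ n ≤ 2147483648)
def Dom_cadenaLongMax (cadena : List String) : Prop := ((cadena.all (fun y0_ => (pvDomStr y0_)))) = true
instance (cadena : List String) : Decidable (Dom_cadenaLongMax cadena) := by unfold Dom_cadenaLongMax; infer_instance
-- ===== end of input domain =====

-- B fuses A's two passes (max-length scan, then collect) into one streaming pass with reset-on-new-max; objective: simpler.


-- ===== PORT A =====
def cadenaLongMax (cadena : List String) : List String :=
  if cadena = [] then []
  else
    let maximaLog : Int :=
      cadena.foldl (fun m elem => if PySem.Str.len elem > m then PySem.Str.len elem else m) 0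
    cadena.foldl (fun lista elem2 =>
      if PySem.Str.len elem2 = maximaLog then lista ++ [elem2] else lista) []

-- ===== PORT B =====
def cadenaLongMax_alt (cadena : List String) : List String :=
  (cadena.foldl (fun (st : Int × List String) elem =>
      if PySem.Str.len elem > st.1 then (PySem.Str.len elem, [elem])
      else if PySem.Str.len elem = st.1 then (st.1, st.2 ++ [elem])
      else st) ((0 : Int), ([] : List String))).2

-- ===== PRECONDITION & SPEC =====
def Spec_cadenaLongMax (cadena : List String) (out : List String) : Prop := out = cadenaLongMax_alt cadena
instance (cadena : List String) (out : List String) : Decidable (Spec_cadenaLongMax cadena out) := by unfold Spec_cadenaLongMax; infer_instance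

-- ===== CLAIM (what is proved, stated in full; the proofs are below) =====
def Claim_equal_cadenaLongMax : Prop := ∀ (cadena : List String), Dom_cadenaLongMax cadena → Spec_cadenaLongMax cadena (cadenaLongMax cadena)

-- ===== LEMMAS AND PROOFS =====

-- A's first loop: running maximum of the lengths
def pvFoldMax (xs : List String) (m : Int) : Int :=
  xs.foldl (fun m elem => if PySem.Str.len elem > m then PySem.Str.len elem else m) m

lemma pvFoldMax_ge (xs : List String) (m : Int) : m ≤ pvFoldMax xs m := by
  induction xs generalizing m with
  | nil => simp [pvFoldMax]
  | cons x xs ih =>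
    simp only [pvFoldMax, List.foldl_cons] at *
    split_ifs with h
    · exact le_trans (le_of_lt h) (ih _)
    · exact ih _

-- B's fold, characterised against A's max and the filter of elements achieving it
lemma pvFoldB_eq (xs : List String) (m : Int) (l : List String) :
    xs.foldl (fun (st : Int × List String) elem =>
      if PySem.Str.len elem > st.1 then (PySem.Str.len elem, [elem])
      else if PySem.Str.len elem = st.1 then (st.1, st.2 ++ [elem])
      else st) (m, l)
    = (pvFoldMax xs m,
       (if pvFoldMax xs m = m then l else []) ++ xs.filter (fun s => PySem.Str.len s = pvFoldMax xs m)) := by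
  induction xs generalizing m l with
  | nil => simp [pvFoldMax]
  | cons x xs ih =>
    simp only [List.foldl_cons]
    by_cases h1 : PySem.Str.len x > m
    · rw [if_pos h1,
        show pvFoldMax (x :: xs) m = pvFoldMax xs (PySem.Str.len x) from by
          simp only [pvFoldMax, List.foldl_cons, if_pos h1],
        ih]
      have hge := pvFoldMax_ge xs (PySem.Str.len x)
      rw [if_neg (show ¬ pvFoldMax xs (PySem.Str.len x) = m from by omega),
        List.filter_cons]
      by_cases h2 : PySem.Str.len x = pvFoldMax xs (PySem.Str.len x)
      · rw [if_pos h2.symm]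
        simp only [PySem.Str.len_eq, String.length_toList] at h2 ⊢
        simp [← h2]
      · rw [if_neg (fun hh => h2 hh.symm)]
        simp only [PySem.Str.len_eq, String.length_toList] at h2 ⊢
        simp [h2]
    · rw [if_neg h1,
        show pvFoldMax (x :: xs) m = pvFoldMax xs m from by
          simp only [pvFoldMax, List.foldl_cons, if_neg h1]]
      by_cases h2 : PySem.Str.len x = m
      · rw [if_pos h2, ih, List.filter_cons]
        by_cases h3 : pvFoldMax xs m = m
        · rw [if_pos h3, if_pos h3,
            if_pos (by simp only [decide_eq_true_eq]; omega)]
          simp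
        · rw [if_neg h3, if_neg h3]
          simp only [PySem.Str.len_eq, String.length_toList] at h2 ⊢
          simp [show ¬ (↑x.length : Int) = pvFoldMax xs m from by omega]
      · rw [if_neg h2, ih, List.filter_cons]
        have hle := pvFoldMax_ge xs m
        simp only [PySem.Str.len_eq, String.length_toList] at h1 h2 ⊢
        simp [show ¬ (↑x.length : Int) = pvFoldMax xs m from by omega]

-- ===== VERDICT (by name: the statement is the Claim_ definition above) =====
theorem cadenaLongMax_spec : Claim_equal_cadenaLongMax := by
  intro cadena _
  unfold Spec_cadenaLongMax cadenaLongMax cadenaLongMax_alt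
  rw [pvFoldB_eq]
  cases cadena with
  | nil => simp [pvFoldMax]
  | cons x xs =>
    simp only [reduceCtorEq, if_false]
    have : List.foldl (fun m elem => if PySem.Str.len elem > m then PySem.Str.len elem else m) 0 (x :: xs) = pvFoldMax (x :: xs) 0 := rfl
    rw [this, PySem.List.foldl_append_ite_eq_filter]
    by_cases h : pvFoldMax (x :: xs) 0 = 0 <;> simp [h]
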